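-- pv_equiv track=rewrite | github.com/villo1991/my-python-journey | 03_oop_Object_Oriented_Programming/funzioni.py | verifica_float
-- ===== SOURCE A (Python) =====
-- def verifica_float(stringa):
--     '''
--    	verifica che la stringa inserita sia convertible in un float escludendo i numeri che iniziano con un punto e poi continuano con sole cifre
--
--     :param stringa: è il parametro stringa che viene accettato dalla funzione
--     :return: ritorna True se il numero è convertibile in float o False se non lo è
--     '''
--     i = 0
--     stato = 0
--
--     while (i < len(stringa)):
--         c = stringa[i]
--         if (stato == 0):
--             if (c.isdigit()):
--                 stato = 1
--             elif (c in {'+', '-'}):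
--                 stato = 2
--             else:
--                 stato = 3
--                 return False
--         elif (stato == 1):
--             if (c.isdigit()):
--                 stato = 1
--             elif (c == '.'):
--                 stato = 4
--             else:
--                 stato = 3
--                 return False
--         elif (stato == 2):
--             if (c.isdigit()):
--                 stato = 1
--             else:
--                 stato = 3
--                 return False
--         elif (stato == 4):
--             if (c.isdigit()):
--                 stato = 5
--             else:
--                 stato = 3
--                 return False
--         elif (stato == 5):
--             if (not c.isdigit()):
--                 stato = 3
--
--         i += 1
--
--     return stato == 1 or stato == 5
-- ===== SOURCE B (Python) =====
-- def verifica_float(stringa):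
--     s = stringa[1:] if stringa[:1] in ('+', '-') else stringa
--     parts = s.split('.')
--     return len(parts) <= 2 and all(p.isdigit() for p in parts)
-- ===== Notes on version B (the rewrite author's own statement) =====
-- stated objective: simpler
-- what changed: Replaced the explicit five-state character-by-character finite state machine with a sign strip followed by splitting on the decimal point and a per-part isdigit() check.
import Mathlib
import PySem

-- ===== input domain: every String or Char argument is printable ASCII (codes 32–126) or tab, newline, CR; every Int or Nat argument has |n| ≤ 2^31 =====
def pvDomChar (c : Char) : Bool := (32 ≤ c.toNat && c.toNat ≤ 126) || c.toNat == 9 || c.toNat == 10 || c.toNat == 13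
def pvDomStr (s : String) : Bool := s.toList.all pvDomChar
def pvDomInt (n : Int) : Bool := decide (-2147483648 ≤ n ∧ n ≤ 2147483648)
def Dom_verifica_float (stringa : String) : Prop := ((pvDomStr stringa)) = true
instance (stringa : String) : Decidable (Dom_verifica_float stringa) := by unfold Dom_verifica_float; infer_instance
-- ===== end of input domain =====

-- B replaces A's five-state character FSM with sign-strip + split on '.' + per-part isdigit: simpler, same O(n) cost.

-- ===== PORT A =====
-- the while loop over i/stato, as structural recursion on the remaining characters with the same stato state
def pvLoopA : List Char → Int → Bool
  | [], stato => stato == 1 || stato == 5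
  | c :: rest, stato =>
    if stato == 0 then
      if PySem.Chars.isdigit c then pvLoopA rest 1
      else if c == '+' || c == '-' then pvLoopA rest 2
      else false
    else if stato == 1 then
      if PySem.Chars.isdigit c then pvLoopA rest 1
      else if c == '.' then pvLoopA rest 4
      else false
    else if stato == 2 then
      if PySem.Chars.isdigit c then pvLoopA rest 1
      else false
    else if stato == 4 then
      if PySem.Chars.isdigit c then pvLoopA rest 5
      else false
    else if stato == 5 then
      if !PySem.Chars.isdigit c then pvLoopA rest 3
      else pvLoopA rest 5
    else pvLoopA rest stato   -- stato == 3: no branch fires, loop continues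

def verifica_float (stringa : String) : Bool :=
  pvLoopA stringa.toList 0

-- ===== PORT B =====
def verifica_float_alt (stringa : String) : Bool :=
  let cs := stringa.toList
  -- s = stringa[1:] if stringa[:1] in ('+', '-') else stringa
  let s := if PySem.List.slice cs none (some 1) == ['+'] || PySem.List.slice cs none (some 1) == ['-']
           then PySem.List.slice cs (some 1) none else cs
  -- parts = s.split('.')
  let parts := PySem.Chars.splitOn s ['.']
  -- len(parts) <= 2 and all(p.isdigit() for p in parts)
  decide (parts.length ≤ 2) && parts.all PySem.Chars.strIsdigit

-- ===== PRECONDITION & SPEC =====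
def Spec_verifica_float (stringa : String) (out : Bool) : Prop := out = verifica_float_alt stringa
instance (stringa : String) (out : Bool) : Decidable (Spec_verifica_float stringa out) := by unfold Spec_verifica_float; infer_instance

-- ===== CLAIM (what is proved, stated in full; the proofs are below) =====
def Claim_equal_verifica_float : Prop := ∀ (stringa : String), Dom_verifica_float stringa → Spec_verifica_float stringa (verifica_float stringa)

-- ===== LEMMAS AND PROOFS =====

-- split of a char list on '.': first part and remaining parts
def pvSp : List Char → List Char × List (List Char)
  | [] => ([], [])
  | c :: r => if c = '.' then ([], (pvSp r).1 :: (pvSp r).2) else (c :: (pvSp r).1, (pvSp r).2)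

theorem pvSplitOn_go (fuel : Nat) : ∀ (l cur : List Char) (acc : List (List Char)),
    l.length ≤ fuel →
    PySem.Chars.splitOn.go ['.'] fuel l cur acc
      = acc.reverse ++ (cur.reverse ++ (pvSp l).1) :: (pvSp l).2 := by
  induction fuel with
  | zero =>
    intro l cur acc h
    have : l = [] := List.eq_nil_of_length_eq_zero (Nat.le_zero.mp h)
    subst this
    simp [PySem.Chars.splitOn.go, pvSp]
  | succ n ih =>
    intro l cur acc h
    cases l with
    | nil => simp [PySem.Chars.splitOn.go, pvSp]
    | cons c rest =>
      by_cases hc : c = '.'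
      · subst hc
        have hpre : List.isPrefixOf ['.'] ('.' :: rest) = true := by
          simp [List.isPrefixOf]
        simp only [PySem.Chars.splitOn.go, hpre, if_pos]
        rw [show List.drop (['.'] : List Char).length ('.' :: rest) = rest by simp]
        rw [ih rest [] (cur.reverse :: acc) (by simpa using Nat.le_of_succ_le_succ h)]
        simp [pvSp]
      · have hpre : List.isPrefixOf ['.'] (c :: rest) = false := by
          simp [List.isPrefixOf]; exact fun h' => hc h'.symm
        simp only [PySem.Chars.splitOn.go, hpre, Bool.false_eq_true, if_false]
        rw [ih rest (c :: cur) acc (by simpa using Nat.le_of_succ_le_succ h)]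
        simp [pvSp, hc]

theorem pvSplitOn_eq (l : List Char) :
    PySem.Chars.splitOn l ['.'] = (pvSp l).1 :: (pvSp l).2 := by
  unfold PySem.Chars.splitOn
  rw [pvSplitOn_go (l.length + 1) l [] [] (Nat.le_succ _)]
  simp

theorem pvLoop3 (cs : List Char) : pvLoopA cs 3 = false := by
  induction cs with
  | nil => decide
  | cons c r ih => simp [pvLoopA, ih]

theorem pvLoop5 (cs : List Char) : pvLoopA cs 5 = cs.all PySem.Chars.isdigit := by
  induction cs with
  | nil => decide
  | cons c r ih =>
    by_cases hd : PySem.Chars.isdigit c = true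
    · simp [pvLoopA, hd, ih]
    · simp [pvLoopA, hd, pvLoop3]

theorem pvLoop4 (cs : List Char) : pvLoopA cs 4 = PySem.Chars.strIsdigit cs := by
  cases cs with
  | nil => decide
  | cons c r =>
    by_cases hd : PySem.Chars.isdigit c = true
    · simp [pvLoopA, hd, pvLoop5, PySem.Chars.strIsdigit]
    · simp [pvLoopA, hd, PySem.Chars.strIsdigit]

def pvTailOK : List (List Char) → Bool
  | [] => true
  | [q] => PySem.Chars.strIsdigit q
  | _ => false

theorem pvSp_snd_nil (r : List Char) (h : (pvSp r).2 = []) : (pvSp r).1 = r := by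
  induction r with
  | nil => simp [pvSp]
  | cons c r ih =>
    by_cases hc : c = '.'
    · subst hc; simp [pvSp] at h
    · simp [pvSp, hc] at h ⊢; exact ih h

theorem pvSp_snd_cons_not_digits (r : List Char) (q : List Char) (t : List (List Char))
    (h : (pvSp r).2 = q :: t) : r.all PySem.Chars.isdigit = false := by
  induction r generalizing q t with
  | nil => simp [pvSp] at h
  | cons c r ih =>
    by_cases hc : c = '.'
    · subst hc; simp [PySem.Chars.isdigit]
    · simp [pvSp, hc] at h
      cases h' : (pvSp r).2 with
      | nil => rw [h'] at h; exact absurd h (by simp)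
      | cons q' t' => simp [ih q' t' h']

theorem pvLoop1 (cs : List Char) :
    pvLoopA cs 1 = ((pvSp cs).1.all PySem.Chars.isdigit && pvTailOK (pvSp cs).2) := by
  induction cs with
  | nil => decide
  | cons c r ih =>
    by_cases hc : c = '.'
    · subst hc
      have : PySem.Chars.isdigit '.' = false := by decide
      simp [pvLoopA, this, pvLoop4, pvSp]
      cases h2 : (pvSp r).2 with
      | nil => simp [pvTailOK, pvSp_snd_nil r h2]
      | cons q t =>
        have hall := pvSp_snd_cons_not_digits r q t h2
        cases t <;> simp [pvTailOK, PySem.Chars.strIsdigit, hall]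
    · by_cases hd : PySem.Chars.isdigit c = true
      · simp [pvLoopA, hd, ih, pvSp, hc]
      · simp [pvLoopA, hd, hc, pvSp]

theorem pvLC (c : Char) (r : List Char) (hd : PySem.Chars.isdigit c = true) :
    (decide (((pvSp (c :: r)).1 :: (pvSp (c :: r)).2).length ≤ 2)
      && ((pvSp (c :: r)).1 :: (pvSp (c :: r)).2).all PySem.Chars.strIsdigit) = pvLoopA r 1 := by
  have hc : c ≠ '.' := by intro h; subst h; simp [PySem.Chars.isdigit] at hd
  rw [pvLoop1]
  simp only [pvSp, if_neg hc]
  cases h2 : (pvSp r).2 with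
  | nil => simp [pvTailOK, PySem.Chars.strIsdigit, hd]
  | cons q t =>
    cases t with
    | nil => simp [pvTailOK, PySem.Chars.strIsdigit, hd, Bool.and_comm, Bool.and_left_comm]
    | cons q' t' => simp [pvTailOK]

-- B's check (after splitOn is rewritten through pvSp), no sign handling
theorem pvL2 (r : List Char) :
    pvLoopA r 2 = (decide (((pvSp r).1 :: (pvSp r).2).length ≤ 2)
      && ((pvSp r).1 :: (pvSp r).2).all PySem.Chars.strIsdigit) := by
  cases r with
  | nil => decide
  | cons d r' =>
    by_cases hd : PySem.Chars.isdigit d = true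
    · rw [show pvLoopA (d :: r') 2 = pvLoopA r' 1 by simp [pvLoopA, hd]]
      exact (pvLC d r' hd).symm
    · have hA : pvLoopA (d :: r') 2 = false := by simp [pvLoopA, hd]
      rw [hA]
      by_cases hc : d = '.'
      · subst hc; simp [pvSp, PySem.Chars.strIsdigit]
      · simp [pvSp, hc, PySem.Chars.strIsdigit, hd]

theorem pvMain (cs : List Char) :
    pvLoopA cs 0
      = (let s := if PySem.List.slice cs none (some 1) == ['+'] || PySem.List.slice cs none (some 1) == ['-']
                  then PySem.List.slice cs (some 1) none else cs
         let parts := PySem.Chars.splitOn s ['.']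
         decide (parts.length ≤ 2) && parts.all PySem.Chars.strIsdigit) := by
  cases cs with
  | nil =>
    simp [PySem.List.slice, pvSplitOn_eq, pvSp, PySem.Chars.strIsdigit]
    decide
  | cons c r =>
    have hslice1 : PySem.List.slice (c :: r) none (some 1) = [c] := by
      simp [PySem.List.slice]
    have hslice2 : PySem.List.slice (c :: r) (some 1) none = r := by
      simp [PySem.List.slice]
    by_cases hs : c = '+' ∨ c = '-'
    · have hd : PySem.Chars.isdigit c = false := by
        rcases hs with h | h <;> subst h <;> decide
      have hA : pvLoopA (c :: r) 0 = pvLoopA r 2 := by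
        rcases hs with h | h <;> subst h <;> simp [pvLoopA, hd]
      have hcond : (PySem.List.slice (c :: r) none (some 1) == ['+']
          || PySem.List.slice (c :: r) none (some 1) == ['-']) = true := by
        rcases hs with h | h <;> subst h <;> simp [hslice1]
      simp only [hcond, if_pos, hslice2]
      rw [hA, pvL2, pvSplitOn_eq]
    · have hcond : (PySem.List.slice (c :: r) none (some 1) == ['+']
          || PySem.List.slice (c :: r) none (some 1) == ['-']) = false := by
        simp [hslice1]
        constructor <;> (intro h; exact hs (by simp [h]))
      have hA : pvLoopA (c :: r) 0 = pvLoopA (c :: r) 2 := by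
        have h1 : (c == '+' || c == '-') = false := by
          simp; constructor <;> (intro h; exact hs (by simp [h]))
        by_cases hd : PySem.Chars.isdigit c = true <;> simp [pvLoopA, hd, h1]
      simp only [hcond, Bool.false_eq_true, if_false]
      rw [hA, pvL2, pvSplitOn_eq]

-- ===== VERDICT (by name: the statement is the Claim_ definition above) =====
theorem verifica_float_spec : Claim_equal_verifica_float := by
  intro stringa _
  unfold Spec_verifica_float verifica_float verifica_float_alt
  exact pvMain stringa.toList
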